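-- pv_equiv track=rewrite | github.com/Joe-You-Know/q_day_work | qday_ibm_oracle_demo.py | unpack_rows
-- ===== SOURCE A (Python) =====
-- from typing import Dict, List, Optional, Tuple
--
-- def unpack_rows(packed: int, moduli: List[int], t: int) -> List[List[int]]:
--     bits_per_m = [(m - 1).bit_length() for m in moduli]
--     residue_offsets, total_bits = [], 0
--     for _ in range(t):
--         for bm in bits_per_m:
--             residue_offsets.append(total_bits)
--             total_bits += bm
--     rows = []
--     for ell in range(t):
--         row = []
--         for mi, m in enumerate(moduli):
--             bm = bits_per_m[mi]
--             off = residue_offsets[ell*len(moduli) + mi]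
--             r = (packed >> off) & ((1 << bm) - 1)
--             row.append(int(r))
--         rows.append(row)
--     return rows
-- ===== SOURCE B (Python) =====
-- from typing import List
--
-- def unpack_rows(packed: int, moduli: List[int], t: int) -> List[List[int]]:
--     # Peel each field off a running value with mask-and-shift: no offset table,
--     # no absolute shifts of the full packed integer.
--     bits = [(m - 1).bit_length() for m in moduli]
--     cur = packed
--     rows = []
--     for _ in range(t):
--         row = []
--         for bm in bits:
--             row.append(cur & ((1 << bm) - 1))
--             cur >>= bm
--         rows.append(row)
--     return rows
-- ===== Notes on version B (the rewrite author's own statement) =====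
-- stated objective: faster
-- what changed: Instead of precomputing a t*k absolute-offset table and extracting every field by shifting the full packed integer by its absolute offset, B keeps one running value and peels each field off its low end with a mask and an in-place right shift, so the offset table disappears and the shifted value shrinks as fields are consumed.
import Mathlib
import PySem

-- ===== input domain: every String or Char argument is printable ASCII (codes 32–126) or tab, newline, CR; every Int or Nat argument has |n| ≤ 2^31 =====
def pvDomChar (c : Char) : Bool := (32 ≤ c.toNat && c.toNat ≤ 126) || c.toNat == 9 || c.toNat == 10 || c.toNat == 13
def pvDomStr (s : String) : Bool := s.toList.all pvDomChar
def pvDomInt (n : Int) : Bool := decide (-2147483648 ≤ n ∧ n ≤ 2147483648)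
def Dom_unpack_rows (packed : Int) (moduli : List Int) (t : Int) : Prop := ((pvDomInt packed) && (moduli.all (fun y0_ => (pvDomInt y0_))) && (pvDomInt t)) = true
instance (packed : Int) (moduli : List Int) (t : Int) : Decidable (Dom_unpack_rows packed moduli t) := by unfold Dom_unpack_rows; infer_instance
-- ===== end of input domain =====

-- B replaces A's precomputed absolute-offset table (and absolute shifts of `packed`)
-- by peeling each field off a running value with mask-and-shift; return value only, no mutation.

-- ===== PORT A =====
-- Literal port of A.  The list indexings bits_per_m[mi] and residue_offsets[ell*k+mi]
-- are always in range (proved in the lemmas below), so the `.getD 0` default is never taken.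
def unpack_rows (packed : Int) (moduli : List Int) (t : Int) : List (List Int) :=
  let bits_per_m : List Int := moduli.map (fun m => ((PySem.Int.bitLength (m - 1) : Nat) : Int))
  let st :=
    (PySem.List.pyRange 0 t 1).foldl
      (fun (st : List Int × Int) _ =>
        bits_per_m.foldl (fun (st : List Int × Int) bm => (st.1 ++ [st.2], st.2 + bm)) st)
      ([], 0)
  let residue_offsets := st.1
  (PySem.List.pyRange 0 t 1).foldl
    (fun rows ell =>
      let row :=
        (PySem.List.enumerate moduli).foldl
          (fun (row : List Int) p =>
            let bm := (PySem.List.pyGet? bits_per_m p.1).getD 0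
            let off := (PySem.List.pyGet? residue_offsets (ell * (moduli.length : Int) + p.1)).getD 0
            let r := PySem.Int.band (packed >>> Int.toNat off) (((1 : Int) <<< Int.toNat bm) - 1)
            row ++ [r])
          []
      rows ++ [row])
    []

-- ===== PORT B =====
-- Literal port of Source B: a running value `cur`, each field = cur & mask, then cur >>= bm.
def unpack_rows_alt (packed : Int) (moduli : List Int) (t : Int) : List (List Int) :=
  let bits : List Int := moduli.map (fun m => ((PySem.Int.bitLength (m - 1) : Nat) : Int))
  let st :=
    (PySem.List.pyRange 0 t 1).foldl
      (fun (st : Int × List (List Int)) _ =>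
        let inner :=
          bits.foldl
            (fun (q : Int × List Int) bm =>
              (q.1 >>> Int.toNat bm, q.2 ++ [PySem.Int.band q.1 (((1 : Int) <<< Int.toNat bm) - 1)]))
            (st.1, [])
        (inner.1, st.2 ++ [inner.2]))
      (packed, [])
  st.2

-- ===== PRECONDITION & SPEC =====
def Spec_unpack_rows (packed : Int) (moduli : List Int) (t : Int) (out : List (List Int)) : Prop := out = unpack_rows_alt packed moduli t
instance (packed : Int) (moduli : List Int) (t : Int) (out : List (List Int)) : Decidable (Spec_unpack_rows packed moduli t out) := by unfold Spec_unpack_rows; infer_instance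

-- ===== CLAIM (what is proved, stated in full; the proofs are below) =====
def Claim_equal_unpack_rows : Prop := ∀ (packed : Int) (moduli : List Int) (t : Int), Dom_unpack_rows packed moduli t → Spec_unpack_rows packed moduli t (unpack_rows packed moduli t)

-- ===== LEMMAS AND PROOFS =====

-- The per-modulus field widths, as naturals.
def pvBits (moduli : List Int) : List Nat := moduli.map (fun m => PySem.Int.bitLength (m - 1))

-- One block of prefix offsets starting at `tot`.
def pvOffBlock (tot : Int) : List Nat → List Int
  | [] => []
  | b :: bs => tot :: pvOffBlock (tot + b) bs

-- `n` consecutive blocks.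
def pvOffMany (ns : List Nat) (tot : Int) : Nat → List Int
  | 0 => []
  | n + 1 => pvOffBlock tot ns ++ pvOffMany ns (tot + (ns.sum : Nat)) n

-- One peeled row.
def pvRow (x : Int) : List Nat → List Int
  | [] => []
  | b :: bs => (PySem.Int.band x (((1 : Int) <<< b) - 1)) :: pvRow (x >>> b) bs

theorem pvOffBlock_length (ns : List Nat) (tot : Int) : (pvOffBlock tot ns).length = ns.length := by
  induction ns generalizing tot with
  | nil => rfl
  | cons b bs ih => simp [pvOffBlock, ih]

theorem pvOffMany_length (ns : List Nat) (tot : Int) (n : Nat) :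
    (pvOffMany ns tot n).length = n * ns.length := by
  induction n generalizing tot with
  | zero => simp [pvOffMany]
  | succ n ih => simp [pvOffMany, ih, pvOffBlock_length]; ring

theorem pvOffBlock_get (ns : List Nat) (tot : Int) (i : Nat) (h : i < ns.length) :
    (pvOffBlock tot ns)[i]'(by rw [pvOffBlock_length]; exact h) =
      tot + ((ns.take i).sum : Nat) := by
  induction ns generalizing tot i with
  | nil => simp at h
  | cons b bs ih =>
    cases i with
    | zero => simp [pvOffBlock]
    | succ i =>
      simp only [pvOffBlock, List.getElem_cons_succ, List.take_succ_cons, List.sum_cons]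
      rw [ih _ _ (by simpa using h)]
      push_cast; ring

theorem pvOffMany_get (ns : List Nat) (tot : Int) (n ℓ i : Nat) (hℓ : ℓ < n) (hi : i < ns.length) :
    (pvOffMany ns tot n)[ℓ * ns.length + i]'(by
        rw [pvOffMany_length]
        calc ℓ * ns.length + i < ℓ * ns.length + ns.length := by omega
        _ = (ℓ + 1) * ns.length := by ring
        _ ≤ n * ns.length := Nat.mul_le_mul_right _ hℓ) =
      tot + (ℓ * ns.sum : Nat) + ((ns.take i).sum : Nat) := by
  induction n generalizing tot ℓ with
  | zero => omega
  | succ n ih =>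
    cases ℓ with
    | zero =>
      simp only [pvOffMany, Nat.zero_mul, Nat.zero_add]
      rw [List.getElem_append_left (by rw [pvOffBlock_length]; exact hi)]
      rw [pvOffBlock_get ns tot i hi]; push_cast; ring
    | succ ℓ =>
      have hlen : (pvOffBlock tot ns).length ≤ (ℓ + 1) * ns.length + i := by
        rw [pvOffBlock_length]; nlinarith
      simp only [pvOffMany]
      rw [List.getElem_append_right hlen]
      have : (ℓ + 1) * ns.length + i - (pvOffBlock tot ns).length = ℓ * ns.length + i := by
        rw [pvOffBlock_length]; ring_nf; omega
      simp only [this]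
      rw [ih _ _ (by omega)]
      push_cast; ring

-- A's offset-building double loop computes exactly pvOffMany.
theorem pvInnerOffsets (ns : List Nat) (acc : List Int) (tot : Int) :
    (List.map (Nat.cast : Nat → Int) ns).foldl
        (fun (st : List Int × Int) bm => (st.1 ++ [st.2], st.2 + bm)) (acc, tot) =
      (acc ++ pvOffBlock tot ns, tot + (ns.sum : Nat)) := by
  induction ns generalizing acc tot with
  | nil => simp [pvOffBlock]
  | cons b bs ih =>
    simp only [List.map_cons, List.foldl_cons, pvOffBlock, List.sum_cons]
    rw [ih]
    simp only [List.append_assoc, List.singleton_append, Prod.mk.injEq]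
    refine ⟨?_, ?_⟩ <;> first | trivial | (push_cast; ring)

theorem pvOuterOffsets (ns : List Nat) (l : List Int) (acc : List Int) (tot : Int) :
    l.foldl
        (fun (st : List Int × Int) _ =>
          (List.map (Nat.cast : Nat → Int) ns).foldl
            (fun (st : List Int × Int) bm => (st.1 ++ [st.2], st.2 + bm)) st)
        (acc, tot) =
      (acc ++ pvOffMany ns tot l.length, tot + (l.length * ns.sum : Nat)) := by
  induction l generalizing acc tot with
  | nil => simp [pvOffMany]
  | cons x l ih =>
    simp only [List.foldl_cons]
    rw [pvInnerOffsets, ih]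
    simp only [pvOffMany, List.length_cons, List.append_assoc, Prod.mk.injEq]
    refine ⟨?_, ?_⟩ <;> first | trivial | (push_cast; ring)

-- pvRow as a map over indices.
theorem pvRow_eq_map (ns : List Nat) (x : Int) :
    pvRow x ns = (List.range ns.length).map
      (fun i => PySem.Int.band (x >>> ((ns.take i).sum)) (((1 : Int) <<< ns.getD i 0) - 1)) := by
  induction ns generalizing x with
  | nil => rfl
  | cons b bs ih =>
    simp only [pvRow, List.length_cons, List.range_succ_eq_map, List.map_cons, List.map_map]
    congr 1
    · simp
    · rw [ih]
      apply List.map_congr_left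
      intro i _
      simp [Int.shiftRight_add, Function.comp]

theorem pvA (packed : Int) (moduli : List Int) (t : Int) :
    unpack_rows packed moduli t =
      (List.range t.toNat).map
        (fun ℓ => pvRow (packed >>> (ℓ * (pvBits moduli).sum)) (pvBits moduli)) := by
  have hbits : moduli.map (fun m => ((PySem.Int.bitLength (m - 1) : Nat) : Int))
      = List.map (Nat.cast : Nat → Int) (pvBits moduli) := by
    simp [pvBits, List.map_map]
  have hlen : (PySem.List.pyRange 0 t 1).length = t.toNat := by
    rw [PySem.List.length_pyRange_one]; simp
  have hk : (pvBits moduli).length = moduli.length := by simp [pvBits]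
  have hA : unpack_rows packed moduli t =
      (PySem.List.pyRange 0 t 1).map (fun ell =>
        (PySem.List.enumerate moduli).map (fun p =>
          PySem.Int.band
            (packed >>> Int.toNat
              ((PySem.List.pyGet? (pvOffMany (pvBits moduli) 0 t.toNat)
                (ell * (moduli.length : Int) + p.1)).getD 0))
            (((1 : Int) <<< Int.toNat
              ((PySem.List.pyGet? (List.map (Nat.cast : Nat → Int) (pvBits moduli)) p.1).getD 0)) - 1))) := by
    unfold unpack_rows
    simp only [hbits]
    rw [pvOuterOffsets, hlen]
    simp only [PySem.List.foldl_append_singleton_eq_map, List.nil_append]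
  rw [hA, PySem.List.pyRange_one]
  simp only [sub_zero, List.map_map]
  apply List.map_congr_left
  intro ℓ hℓ
  rw [List.mem_range] at hℓ
  rw [Function.comp_apply, PySem.List.enumerate_eq_map_pyRange (d := 0), PySem.List.pyRange_one]
  simp only [sub_zero, List.map_map]
  rw [pvRow_eq_map]
  simp only [PySem.List.len_eq, Int.toNat_natCast, zero_add]
  rw [hk]
  apply List.map_congr_left
  intro i hi
  rw [List.mem_range] at hi
  have hi' : i < (pvBits moduli).length := by rw [hk]; exact hi
  simp only [Function.comp_apply]
  have hbm : (PySem.List.pyGet? (List.map (Nat.cast : Nat → Int) (pvBits moduli)) (i : Int)).getD 0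
      = (((pvBits moduli)[i]'hi' : Nat) : Int) := by
    rw [PySem.List.pyGet?_natCast]
    simp [List.getElem?_eq_getElem hi']
  have hidx : ((ℓ : Int) * (moduli.length : Int) + (i : Int))
      = ((ℓ * (pvBits moduli).length + i : Nat) : Int) := by
    rw [hk]; push_cast; ring
  have hoffb : ℓ * (pvBits moduli).length + i < t.toNat * (pvBits moduli).length := by
    nlinarith [hℓ, hi']
  have hoff : (PySem.List.pyGet? (pvOffMany (pvBits moduli) 0 t.toNat)
        ((ℓ : Int) * (moduli.length : Int) + (i : Int))).getD 0
      = ((ℓ * (pvBits moduli).sum + (List.take i (pvBits moduli)).sum : Nat) : Int) := by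
    rw [hidx, PySem.List.pyGet?_natCast,
      List.getElem?_eq_getElem (by rw [pvOffMany_length]; exact hoffb)]
    rw [pvOffMany_get _ _ _ _ _ hℓ hi']
    simp only [Option.getD_some]
    push_cast; ring
  rw [hbm, hoff]
  simp only [Int.toNat_natCast]
  rw [Int.shiftRight_add]
  congr 1
  rw [List.getD_eq_getElem?_getD, List.getElem?_eq_getElem hi']
  rfl

-- ---------- B-side ----------

-- B's inner loop computes (x >>> sum, row).
theorem pvAltInner (ns : List Nat) (x : Int) :
    (List.map (Nat.cast : Nat → Int) ns).foldl
        (fun (q : Int × List Int) bm =>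
          (q.1 >>> Int.toNat bm, q.2 ++ [PySem.Int.band q.1 (((1 : Int) <<< Int.toNat bm) - 1)]))
        (x, []) =
      (x >>> ns.sum, pvRow x ns) := by
  suffices h : ∀ (ns : List Nat) (x : Int) (acc : List Int),
      (List.map (Nat.cast : Nat → Int) ns).foldl
          (fun (q : Int × List Int) bm =>
            (q.1 >>> Int.toNat bm, q.2 ++ [PySem.Int.band q.1 (((1 : Int) <<< Int.toNat bm) - 1)]))
          (x, acc) =
        (x >>> ns.sum, acc ++ pvRow x ns) by
    simpa using h ns x []
  intro ns
  induction ns with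
  | nil => intro x acc; simp [pvRow]
  | cons b bs ih =>
    intro x acc
    simp only [List.map_cons, List.foldl_cons, pvRow]
    rw [ih]
    simp only [Int.toNat_natCast, List.sum_cons, Prod.mk.injEq, List.append_assoc,
      List.singleton_append]
    refine ⟨?_, ?_⟩ <;> first | trivial | (exact (Int.shiftRight_add x b bs.sum).symm)

-- B's outer loop, via a named step function.
def pvAltStep (ns : List Nat) (st : Int × List (List Int)) (_ : Int) : Int × List (List Int) :=
  let inner :=
    (List.map (Nat.cast : Nat → Int) ns).foldl
      (fun (q : Int × List Int) bm =>
        (q.1 >>> Int.toNat bm, q.2 ++ [PySem.Int.band q.1 (((1 : Int) <<< Int.toNat bm) - 1)]))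
      (st.1, [])
  (inner.1, st.2 ++ [inner.2])

theorem pvAltStep_eq (ns : List Nat) (st : Int × List (List Int)) (y : Int) :
    pvAltStep ns st y = (st.1 >>> ns.sum, st.2 ++ [pvRow st.1 ns]) := by
  unfold pvAltStep
  rw [pvAltInner]

theorem pvAltOuter (ns : List Nat) (l : List Int) (x : Int) (acc : List (List Int)) :
    l.foldl (pvAltStep ns) (x, acc) =
      (x >>> (l.length * ns.sum),
        acc ++ (List.range l.length).map (fun ℓ => pvRow (x >>> (ℓ * ns.sum)) ns)) := by
  induction l generalizing x acc with
  | nil => simp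
  | cons y l ih =>
    rw [List.foldl_cons, pvAltStep_eq, ih]
    simp only [List.length_cons, List.range_succ_eq_map, List.map_cons, List.map_map,
      Prod.mk.injEq, List.append_assoc, List.singleton_append]
    refine ⟨by rw [← Int.shiftRight_add]; ring_nf, ?_⟩
    rw [show (0 : Nat) * ns.sum = 0 from by ring, Int.shiftRight_zero]
    exact congrArg _ (congrArg _ (List.map_congr_left (fun a _ => by
      simp only [Function.comp_apply]
      rw [← Int.shiftRight_add]
      congr 1
      rw [Nat.succ_mul, Nat.add_comm])))

theorem pvB (packed : Int) (moduli : List Int) (t : Int) :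
    unpack_rows_alt packed moduli t =
      (List.range t.toNat).map
        (fun ℓ => pvRow (packed >>> (ℓ * (pvBits moduli).sum)) (pvBits moduli)) := by
  have hbits : moduli.map (fun m => ((PySem.Int.bitLength (m - 1) : Nat) : Int))
      = List.map (Nat.cast : Nat → Int) (pvBits moduli) := by
    simp [pvBits, List.map_map]
  have hB : unpack_rows_alt packed moduli t =
      ((PySem.List.pyRange 0 t 1).foldl (pvAltStep (pvBits moduli)) (packed, [])).2 := by
    unfold unpack_rows_alt
    rw [hbits]
    rfl
  have hlen : (PySem.List.pyRange 0 t 1).length = t.toNat := by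
    rw [PySem.List.length_pyRange_one]; simp
  rw [hB, pvAltOuter, hlen]
  simp only [List.nil_append]

theorem pvMain (packed : Int) (moduli : List Int) (t : Int) :
    unpack_rows packed moduli t = unpack_rows_alt packed moduli t :=
  (pvA packed moduli t).trans (pvB packed moduli t).symm

theorem unpack_rows_spec : Claim_equal_unpack_rows := by
  intro packed moduli t _
  unfold Spec_unpack_rows
  exact pvMain packed moduli t
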